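-- pv_equiv track=rewrite | github.com/DobbiKov/paris-saclay-bot | modules/send_day_schedule.py | get_excel_fields_for_day
-- ===== SOURCE A (Python) =====
-- def get_excel_row_for_week(week):
--     return 5 + week
--
-- def get_excel_fields_for_day(day, week):
--     if day > 5 or day == 0:
--         return []
--     row_week = get_excel_row_for_week(week)
--     days = [
--         ["C", "D", "E", "F"],
--         ["G", "H", "I", "J"],
--         ["K", "L", "M", "N"],
--         ["O", "P", "Q", "R"],
--         ["S", "T", "U", "V"],
--     ]
--     for i in range(len(days)):
--         for j in range(len(days[i])):
--             days[i][j] = days[i][j] + f'{row_week}'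
--     return days[day-1]
-- ===== SOURCE B (Python) =====
-- def get_excel_fields_for_day(day, week):
--     if day > 5 or day == 0:
--         return []
--     start = "CGKOS"[day - 1]
--     return [chr(ord(start) + k) + f'{5 + week}' for k in range(4)]
-- ===== Notes on version B (the rewrite author's own statement) =====
-- stated objective: simpler
-- what changed: B drops the 5x4 table and the nested mutation loops: it picks a row-start letter from the 5-char string 'CGKOS' (same negative-index semantics) and generates the four cell names by character arithmetic in one comprehension.
import Mathlib
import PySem

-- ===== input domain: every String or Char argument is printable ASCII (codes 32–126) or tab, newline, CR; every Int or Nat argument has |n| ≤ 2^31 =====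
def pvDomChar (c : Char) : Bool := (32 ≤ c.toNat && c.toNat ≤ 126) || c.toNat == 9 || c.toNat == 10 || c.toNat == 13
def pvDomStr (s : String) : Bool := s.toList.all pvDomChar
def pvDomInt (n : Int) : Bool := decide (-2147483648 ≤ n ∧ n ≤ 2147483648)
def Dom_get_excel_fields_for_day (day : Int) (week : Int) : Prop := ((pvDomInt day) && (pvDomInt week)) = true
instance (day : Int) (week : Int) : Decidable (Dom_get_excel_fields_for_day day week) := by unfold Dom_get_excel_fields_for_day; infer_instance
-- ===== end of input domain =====

-- B replaces A's 5x4 letter table and nested rewrite loops by picking a row-start letter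
-- from "CGKOS" and generating the four cells by character arithmetic (objective: simpler).


-- ===== PORT A =====
def get_excel_row_for_week (week : Int) : Int := 5 + week

-- string concatenation 'c + str(row_week)' is ported on the char-list level (exact for
-- Python's sequence-of-characters strings)
def get_excel_fields_for_day (day : Int) (week : Int) : List String :=
  if day > 5 ∨ day = 0 then []
  else
    let row_week := get_excel_row_for_week week
    let days : List (List String) :=
      [["C", "D", "E", "F"],
       ["G", "H", "I", "J"],
       ["K", "L", "M", "N"],
       ["O", "P", "Q", "R"],
       ["S", "T", "U", "V"]]
    -- the nested in-place rewrite loop: every cell gets the row number appended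
    let days := days.map (fun row => row.map (fun c =>
      String.ofList (c.toList ++ (PySem.Int.toStr row_week).toList)))
    (PySem.List.pyGet? days (day - 1)).getD []   -- none (IndexError) excluded by Pre_

-- ===== PORT B =====
def get_excel_fields_for_day_alt (day : Int) (week : Int) : List String :=
  if day > 5 ∨ day = 0 then []
  else
    let start := (PySem.Str.pyGet? "CGKOS" (day - 1)).getD 'C'   -- none (IndexError) excluded by Pre_
    (List.range 4).map (fun k =>
      String.ofList (Char.ofNat (start.toNat + k) :: (PySem.Int.toStr (5 + week)).toList))

-- ===== PRECONDITION & SPEC =====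
-- Pre_ excludes exactly day ≤ -5, where A's days[day-1] (and B's "CGKOS"[day-1]) raise IndexError.
def Pre_get_excel_fields_for_day (day : Int) (week : Int) : Prop :=
  day > 5 ∨ day = 0 ∨ -4 ≤ day
instance (day : Int) (week : Int) : Decidable (Pre_get_excel_fields_for_day day week) := by
  unfold Pre_get_excel_fields_for_day; infer_instance

def pvWitness_get_excel_fields_for_day : Int × Int := (2, 3)

def Spec_get_excel_fields_for_day (day : Int) (week : Int) (out : List String) : Prop := out = get_excel_fields_for_day_alt day week
instance (day : Int) (week : Int) (out : List String) : Decidable (Spec_get_excel_fields_for_day day week out) := by unfold Spec_get_excel_fields_for_day; infer_instance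

-- ===== CLAIM (what is proved, stated in full; the proofs are below) =====
def Claim_equal_get_excel_fields_for_day : Prop := ∀ (day : Int) (week : Int), Dom_get_excel_fields_for_day day week → Pre_get_excel_fields_for_day day week → Spec_get_excel_fields_for_day day week (get_excel_fields_for_day day week)

-- ===== LEMMAS AND PROOFS =====
lemma pvOfListCons (c : Char) (L : List Char) :
    String.ofList (c :: L) = String.ofList [c] ++ String.ofList L := by
  apply String.toList_injective; simp

-- ===== VERDICT (by name: the statement is the Claim_ definition above) =====
theorem get_excel_fields_for_day_spec : Claim_equal_get_excel_fields_for_day := by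
  intro day week _ hpre
  unfold Spec_get_excel_fields_for_day
  by_cases h : day > 5 ∨ day = 0
  · simp [get_excel_fields_for_day, get_excel_fields_for_day_alt, h]
  · have h1 : -4 ≤ day := by unfold Pre_get_excel_fields_for_day at hpre; omega
    have h2 : day ≤ 5 := by omega
    interval_cases day <;>
      simp_all [get_excel_fields_for_day, get_excel_fields_for_day_alt,
        get_excel_row_for_week, PySem.List.pyGet?, PySem.Str.pyGet?,
        PySem.Chars.pyGet?, PySem.List.pyIdx?, List.range_succ] <;>
      and_intros <;> rw [pvOfListCons]
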